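-- pv_equiv track=rewrite | github.com/duhines/NIC-MAXSAT | genetic_alg.py | pretty_solution
-- ===== SOURCE A (Python) =====
-- def pretty_solution(solution):
--     """
--     Purpose: Modify the solution to that it is represented as a mostly legible
--         string.
--     Input: Solution as a list of boolean values.
--     Return: Solution represented as a string
--     """
--     pretty = ""
--     ith_literal = 1
--     ten_per_line = 0
--     for literal in solution:
--         pretty = pretty + "L" + str(ith_literal) + ": " + str(literal) + "  "
--         ith_literal = ith_literal + 1
--         ten_per_line = ten_per_line + 1
--         if ten_per_line > 10:
--             ten_per_line = 0
--             pretty = pretty + "\n"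
--     return pretty
-- ===== SOURCE B (Python) =====
-- def pretty_solution(solution):
--     parts = ["L" + str(i) + ": " + str(v) + "  " for i, v in enumerate(solution, 1)]
--     blocks = []
--     for start in range(0, len(parts), 11):
--         chunk = parts[start:start + 11]
--         block = "".join(chunk)
--         if len(chunk) == 11:
--             block += "\n"
--         blocks.append(block)
--     return "".join(blocks)
-- ===== Notes on version B (the rewrite author's own statement) =====
-- stated objective: faster
-- what changed: B first builds the list of per-literal strings with enumerate, then assembles the output in an outer pass over 11-element chunks (joining each chunk and appending a newline after every full chunk), replacing A's single flat loop that grows one string by repeated concatenation with a modular line counter.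
import Mathlib
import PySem

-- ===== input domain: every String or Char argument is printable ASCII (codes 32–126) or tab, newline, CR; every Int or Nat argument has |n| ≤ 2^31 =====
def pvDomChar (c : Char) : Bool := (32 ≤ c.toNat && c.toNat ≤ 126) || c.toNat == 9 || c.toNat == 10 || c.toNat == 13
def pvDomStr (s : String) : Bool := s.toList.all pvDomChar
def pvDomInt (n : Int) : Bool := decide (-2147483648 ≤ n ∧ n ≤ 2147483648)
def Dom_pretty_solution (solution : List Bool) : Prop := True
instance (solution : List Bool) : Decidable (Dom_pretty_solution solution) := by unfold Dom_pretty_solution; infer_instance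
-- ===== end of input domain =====

-- B rebuilds the string from precomputed per-literal pieces in chunks of 11 (an outer chunk pass)
-- instead of A's single flat loop with a modular line counter; same output, different decomposition.

-- ===== PORT A =====
-- the for-loop of A, state (pretty, ith_literal, ten_per_line)
def pvLoopA (solution : List Bool) (pretty : String) (ith ten : Int) : String :=
  match solution with
  | [] => pretty
  | literal :: rest =>
    let pretty := pretty ++ "L" ++ PySem.Int.toStr ith ++ ": " ++ (if literal then "True" else "False") ++ "  "
    let ith := ith + 1
    let ten := ten + 1
    if ten > 10 then pvLoopA rest (pretty ++ "\n") ith 0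
    else pvLoopA rest pretty ith ten

def pretty_solution (solution : List Bool) : String :=
  pvLoopA solution "" 1 0

-- ===== PORT B =====
-- "L" + str(i) + ": " + str(v) + "  "  for one enumerated literal
def pvPiece (p : Int × Bool) : String :=
  "L" ++ PySem.Int.toStr p.1 ++ ": " ++ (if p.2 then "True" else "False") ++ "  "

-- the chunk loop of Source B: for start in range(0, len, 11): join parts[start:start+11], newline after a full chunk
def pvChunks (parts : List String) : String :=
  if h : parts = [] then ""
  else
    (PySem.Str.join "" (parts.take 11) ++ (if (parts.take 11).length = 11 then "\n" else "")) ++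
      pvChunks (parts.drop 11)
termination_by parts.length
decreasing_by
  have : 0 < parts.length := List.length_pos_iff.mpr h
  simp
  omega

def pretty_solution_alt (solution : List Bool) : String :=
  pvChunks ((PySem.List.enumerate solution 1).map pvPiece)

-- ===== PRECONDITION & SPEC =====
def Spec_pretty_solution (solution : List Bool) (out : String) : Prop := out = pretty_solution_alt solution
instance (solution : List Bool) (out : String) : Decidable (Spec_pretty_solution solution out) := by unfold Spec_pretty_solution; infer_instance

-- ===== CLAIM (what is proved, stated in full; the proofs are below) =====
def Claim_equal_pretty_solution : Prop := ∀ (solution : List Bool), Dom_pretty_solution solution → Spec_pretty_solution solution (pretty_solution solution)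

-- ===== LEMMAS AND PROOFS =====

theorem pvJoin_cons (a : String) (l : List String) :
    PySem.Str.join "" (a :: l) = a ++ PySem.Str.join "" l := by
  apply String.toList_inj.mp
  cases l with
  | nil => simp [PySem.Str.join, PySem.Chars.join_singleton, PySem.Chars.join_nil]
  | cons b t => simp [PySem.Str.join, PySem.Chars.join_cons_cons]

theorem pvJoin_nil : PySem.Str.join "" ([] : List String) = "" := by
  decide

theorem pvLoopA_prefix (l : List Bool) (p : String) (i t : Int) :
    pvLoopA l p i t = p ++ pvLoopA l "" i t := by
  induction l generalizing p i t with
  | nil => simp [pvLoopA]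
  | cons b rest ih =>
    simp only [pvLoopA]
    split
    · rw [ih]
      conv_rhs => rw [ih]
      simp [String.append_assoc]
    · rw [ih]
      conv_rhs => rw [ih]
      simp [String.append_assoc]

-- the loop from a line position with k ∈ [1,11] slots left on the current line
theorem pvLoopA_step (l : List Bool) (i : Int) (k : Nat) (hk1 : 1 ≤ k) (hk : k ≤ 11) :
    pvLoopA l "" i (11 - (k : Int)) =
      PySem.Str.join "" (((PySem.List.enumerate l i).map pvPiece).take k) ++
        (if k ≤ l.length then "\n" ++ pvLoopA (l.drop k) "" (i + (k : Int)) 0 else "") := by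
  induction l generalizing i k with
  | nil =>
    simp [pvLoopA, pvJoin_nil]
    omega
  | cons b rest ih =>
    rw [PySem.List.enumerate_cons]
    obtain ⟨j, rfl⟩ : ∃ j, k = j + 1 := ⟨k - 1, by omega⟩
    by_cases hj : j = 0
    · subst hj
      have hcond : (11 - ((0 + 1 : Nat) : Int)) + 1 > 10 := by omega
      simp only [pvLoopA, if_pos hcond]
      rw [pvLoopA_prefix]
      rw [List.map_cons, List.take_succ_cons, List.take_zero, pvJoin_cons, pvJoin_nil]
      have hlen : (0 + 1 ≤ (b :: rest).length) := by simp
      rw [if_pos hlen]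
      simp [pvPiece, ← String.append_assoc]
    · have hj1 : 1 ≤ j := by omega
      have hcond : ¬ ((11 - ((j + 1 : Nat) : Int)) + 1 > 10) := by omega
      simp only [pvLoopA, if_neg hcond]
      rw [pvLoopA_prefix]
      have harg : (11 - ((j + 1 : Nat) : Int)) + 1 = 11 - (j : Int) := by push_cast; ring
      rw [harg, ih (i + 1) j hj1 (by omega)]
      rw [List.map_cons, List.take_succ_cons, pvJoin_cons, List.drop_succ_cons]
      have hlen : (j + 1 ≤ (b :: rest).length) ↔ (j ≤ rest.length) := by simp
      have hi : i + 1 + (j : Int) = i + ((j + 1 : Nat) : Int) := by push_cast; ring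
      rw [hi]
      by_cases hc : j ≤ rest.length
      · rw [if_pos hc, if_pos (hlen.mpr hc)]
        simp [pvPiece, String.append_assoc]
      · rw [if_neg hc, if_neg (fun h => hc (hlen.mp h))]
        simp [pvPiece, String.append_assoc]

theorem pvEnumerate_map_drop (l : List Bool) (i : Int) (h : 11 ≤ l.length) :
    ((PySem.List.enumerate l i).map pvPiece).drop 11 =
      (PySem.List.enumerate (l.drop 11) (i + 11)).map pvPiece := by
  conv_lhs => rw [show l = l.take 11 ++ l.drop 11 from (List.take_append_drop 11 l).symm]
  rw [PySem.List.enumerate_append, List.map_append]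
  have hlen : ((PySem.List.enumerate (l.take 11) i).map pvPiece).length = 11 := by
    simp [PySem.List.length_enumerate]
    omega
  rw [List.drop_left' hlen]
  have h11 : (l.take 11).length = 11 := by simp; omega
  rw [h11]
  norm_num

theorem pvMain : ∀ (n : Nat) (l : List Bool), l.length = n → ∀ (i : Int),
    pvLoopA l "" i 0 = pvChunks ((PySem.List.enumerate l i).map pvPiece) := by
  intro n
  induction n using Nat.strong_induction_on with
  | _ n ih =>
    intro l hl i
    by_cases hnil : l = []
    · subst hnil
      simp [pvLoopA, PySem.List.enumerate_nil, pvChunks]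
    · have hplen : ((PySem.List.enumerate l i).map pvPiece).length = l.length := by
        simp [PySem.List.length_enumerate]
      have hpieces : ((PySem.List.enumerate l i).map pvPiece) ≠ [] := by
        intro hc
        apply hnil
        have h0 := congrArg List.length hc
        rw [hplen] at h0
        exact List.length_eq_zero_iff.mp (by simpa using h0)
      rw [show (0 : Int) = 11 - ((11 : Nat) : Int) by norm_num,
        pvLoopA_step l i 11 (by omega) (by omega)]
      rw [pvChunks, dif_neg hpieces]
      have htlen : (((PySem.List.enumerate l i).map pvPiece).take 11).length
          = min 11 l.length := by simp [hplen]
      by_cases hc : 11 ≤ l.length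
      · rw [if_pos hc]
        have hmin : min 11 l.length = 11 := by omega
        rw [htlen, hmin, if_pos rfl]
        rw [pvEnumerate_map_drop l i hc]
        rw [← ih (l.length - 11) (by omega) (l.drop 11) (by simp) (i + 11)]
        push_cast
        simp [String.append_assoc]
      · rw [if_neg hc]
        have hmin : ¬ (min 11 l.length = 11) := by omega
        rw [htlen, if_neg hmin]
        have hdrop : ((PySem.List.enumerate l i).map pvPiece).drop 11 = [] := by
          apply List.drop_eq_nil_of_le
          omega
        rw [hdrop, pvChunks, dif_pos rfl]
        simp

-- ===== VERDICT (by name: the statement is the Claim_ definition above) =====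
theorem pretty_solution_spec : Claim_equal_pretty_solution := by
  intro solution _
  unfold Spec_pretty_solution pretty_solution pretty_solution_alt
  exact pvMain solution.length solution rfl 1
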